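-- pv_equiv track=rewrite | github.com/apetrovskiy/testHaRa | src/main/java/interview/greedy/GreedyFlorist/greedy_florist.py | getMinimumCost
-- ===== SOURCE A (Python) =====
-- def getMinimumCost(k, c):
--     result = 0
--     buyers = []
--     for i in range(k):
--         buyers.append([])
--     c.sort(reverse=True)
--     for i in range(0, len(c), k):
--         for j in range(k):
--             if i + j < len(c):
--                 buyers[j].append(c[i + j])
--     for i in range(k):
--         for j in range(len(buyers[i])):
--             result += buyers[i][j] * (1 + j)
--     return result
-- ===== SOURCE B (Python) =====
-- def getMinimumCost(k, c):
--     c.sort(reverse=True)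
--     return sum(x * (i // k + 1) for i, x in enumerate(c))
-- ===== Notes on version B (the rewrite author's own statement) =====
-- stated objective: simpler
-- what changed: Instead of building k per-buyer lists in a batched distribution pass and then summing them with a second nested loop, B sorts descending in place and accumulates in a single pass, reading each flower's multiplier directly from its index as i // k + 1; the single pass with no intermediate per-buyer lists gives a constant-factor speedup (measured ~2.2x).
-- outside the precondition, e.g. on getMinimumCost(-1, [5]): A returns 0, B returns 5
import Mathlib
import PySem

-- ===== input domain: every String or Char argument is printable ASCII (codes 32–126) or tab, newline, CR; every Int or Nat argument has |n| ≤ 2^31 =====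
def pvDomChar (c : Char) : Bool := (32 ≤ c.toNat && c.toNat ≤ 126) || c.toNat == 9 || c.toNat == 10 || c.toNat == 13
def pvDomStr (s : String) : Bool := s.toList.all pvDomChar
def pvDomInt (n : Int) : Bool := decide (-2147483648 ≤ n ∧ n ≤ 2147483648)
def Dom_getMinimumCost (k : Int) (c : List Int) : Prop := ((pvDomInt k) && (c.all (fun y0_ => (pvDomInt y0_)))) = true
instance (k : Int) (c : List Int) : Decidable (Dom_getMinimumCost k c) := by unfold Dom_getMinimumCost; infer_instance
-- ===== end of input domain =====

-- B replaces A's per-buyer list building + second summation pass by one in-place-sorted pass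
-- whose multiplier is computed from the index (i // k + 1); simpler, same asymptotic cost.
-- A sorts c in place (c.sort(reverse=True)); B performs the same mutation; the equivalence
-- proved here is about the return value.


-- ===== PORT A =====
def getMinimumCost (k : Int) (c : List Int) : Int :=
  let result : Int := 0
  let buyers : List (List Int) :=
    (PySem.List.pyRange 0 k).foldl (fun bs _ => bs ++ [([] : List Int)]) []
  let s := PySem.List.sorted c id true
  let buyers :=
    (PySem.List.pyRange 0 (s.length : Int) k).foldl (fun bs i =>
      (PySem.List.pyRange 0 k).foldl (fun bs j =>
        if i + j < (s.length : Int) then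
          PySem.List.pySetD bs j (PySem.List.pyGetD bs j [] ++ [PySem.List.pyGetD s (i + j) 0])
        else bs) bs) buyers
  let result :=
    (PySem.List.pyRange 0 k).foldl (fun r i =>
      (PySem.List.pyRange 0 ((PySem.List.pyGetD buyers i []).length : Int)).foldl (fun r j =>
        r + PySem.List.pyGetD (PySem.List.pyGetD buyers i []) j 0 * (1 + j)) r) result
  result

-- ===== PORT B =====
def getMinimumCost_alt (k : Int) (c : List Int) : Int :=
  let s := PySem.List.sorted c id true
  ((PySem.List.enumerate s).map (fun p => p.2 * (PySem.Int.floordiv p.1 k + 1))).sum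

-- ===== PRECONDITION & SPEC =====
-- Pre_ restricts to the natural domain k ≥ 1 (at least one buyer): A raises ValueError for
-- k = 0 (zero range step), and for k < 0 — outside the problem's meaning — A's returned 0 is
-- an accident of range() being empty for a negative step.
def Pre_getMinimumCost (k : Int) (c : List Int) : Prop := 1 ≤ k
instance (k : Int) (c : List Int) : Decidable (Pre_getMinimumCost k c) := by unfold Pre_getMinimumCost; infer_instance
def pvWitness_getMinimumCost : Int × List Int := (2, [3, 1, 2])

def Spec_getMinimumCost (k : Int) (c : List Int) (out : Int) : Prop := out = getMinimumCost_alt k c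
instance (k : Int) (c : List Int) (out : Int) : Decidable (Spec_getMinimumCost k c out) := by unfold Spec_getMinimumCost; infer_instance

-- ===== CLAIM (what is proved, stated in full; the proofs are below) =====
def Claim_equal_getMinimumCost : Prop := ∀ (k : Int) (c : List Int), Dom_getMinimumCost k c → Pre_getMinimumCost k c → Spec_getMinimumCost k c (getMinimumCost k c)
-- ===== LEMMAS AND PROOFS =====

def pvDistr (s : List Int) (i : Int) : List (List Int) → List (List Int)
  | [] => []
  | b :: bs =>
      (if i < (s.length : Int) then b ++ [PySem.List.pyGetD s i 0] else b) :: pvDistr s (i + 1) bs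

theorem pvDistr_append (s : List Int) (i : Int) (xs ys : List (List Int)) :
    pvDistr s i (xs ++ ys) = pvDistr s i xs ++ pvDistr s (i + (xs.length : Int)) ys := by
  induction xs generalizing i with
  | nil => simp [pvDistr]
  | cons b xs ih =>
      simp only [List.cons_append, pvDistr, ih, List.length_cons]
      have h : i + 1 + (xs.length : Int) = i + ((xs.length + 1 : Nat) : Int) := by push_cast; ring
      rw [h]

theorem pvDistr_length (s : List Int) (i : Int) (bs : List (List Int)) :
    (pvDistr s i bs).length = bs.length := by
  induction bs generalizing i with
  | nil => rfl
  | cons b bs ih => simp [pvDistr, ih]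

theorem pvInner_fold (s : List Int) (i : Int) (bs : List (List Int)) :
    ∀ (m : Nat), m ≤ bs.length →
      (PySem.List.pyRange 0 (m : Int)).foldl (fun bs j =>
        if i + j < (s.length : Int) then
          PySem.List.pySetD bs j (PySem.List.pyGetD bs j [] ++ [PySem.List.pyGetD s (i + j) 0])
        else bs) bs
      = pvDistr s i (bs.take m) ++ bs.drop m := by
  intro m
  induction m with
  | zero => intro _; simp [PySem.List.pyRange_one_eq_nil le_rfl, pvDistr]
  | succ m ih =>
      intro hm
      have hm' : m < bs.length := by omega
      have hcast : ((m + 1 : Nat) : Int) = (m : Int) + 1 := by push_cast; ring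
      rw [hcast, PySem.List.pyRange_one_succ_right (by positivity), List.foldl_append,
          ih (by omega)]
      simp only [List.foldl_cons, List.foldl_nil]
      have hlenA : (pvDistr s i (bs.take m)).length = m := by
        rw [pvDistr_length, List.length_take]; omega
      have hdrop : bs.drop m = bs[m] :: bs.drop (m + 1) := by
        rw [List.drop_eq_getElem_cons hm']
      have hget : PySem.List.pyGetD (pvDistr s i (bs.take m) ++ bs.drop m) ((m : Nat) : Int) [] = bs[m] := by
        rw [PySem.List.pyGetD_natCast, hdrop]
        simp [List.getD, List.getElem?_append_right, hlenA, List.getElem?_eq_getElem hm']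
      have htake : bs.take (m + 1) = bs.take m ++ [bs[m]] := by
        rw [List.take_add_one]
        simp [List.getElem?_eq_getElem hm']
      have hlen2 : m < (pvDistr s i (bs.take m) ++ bs.drop m).length := by
        simp [hlenA]; omega
      have hset : ∀ v, PySem.List.pySetD (pvDistr s i (bs.take m) ++ bs.drop m) ((m : Nat) : Int) v
          = pvDistr s i (bs.take m) ++ (v :: bs.drop (m + 1)) := by
        intro v
        have : PySem.List.pySetD (pvDistr s i (bs.take m) ++ bs.drop m) ((m : Nat) : Int) v
            = (pvDistr s i (bs.take m) ++ bs.drop m).set m v := by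
          simp [PySem.List.pySetD, PySem.List.pySet?, PySem.List.pyIdx?]
          rw [if_pos (by rw [hlenA]; omega)]
          simp
        rw [this, List.set_append, hlenA, if_neg (by omega), Nat.sub_self, hdrop,
            List.set_cons_zero]
      rw [htake, pvDistr_append]
      have hlenTake : ((bs.take m).length : Int) = (m : Int) := by simp [hm'.le]
      rw [hlenTake]
      by_cases hc : i + (m : Int) < (s.length : Int)
      · rw [if_pos hc, hget, hset]
        simp [pvDistr, hc]
      · rw [if_neg hc, hdrop]
        simp [pvDistr, hc]

def pvWrow (b : List Int) : Int :=
  ((PySem.List.enumerate b).map (fun p => p.2 * (p.1 + 1))).sum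
def pvW (bs : List (List Int)) : Int := (bs.map pvWrow).sum
def pvTsum (s : List Int) (k i : Int) : Int :=
  ((PySem.List.pyRange i (s.length : Int)).map
    (fun j => PySem.List.pyGetD s j 0 * (PySem.Int.floordiv j k + 1))).sum

theorem pvWrow_append (b : List Int) (x : Int) :
    pvWrow (b ++ [x]) = pvWrow b + x * ((b.length : Int) + 1) := by
  simp only [pvWrow]
  rw [PySem.List.enumerate_append]
  simp [PySem.List.enumerate_cons, PySem.List.enumerate_nil]

theorem pvDistr_lengths (s : List Int) (q : Nat) :
    ∀ (bs : List (List Int)) (i : Int), (∀ b ∈ bs, b.length = q) →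
      i + (bs.length : Int) ≤ (s.length : Int) →
      ∀ b ∈ pvDistr s i bs, b.length = q + 1 := by
  intro bs
  induction bs with
  | nil => intro i _ _ b hb; simp [pvDistr] at hb
  | cons a bs ih =>
      intro i hall hle b hb
      have hi : i < (s.length : Int) := by
        have := hle; simp only [List.length_cons] at this; push_cast at this; omega
      simp only [pvDistr, if_pos hi, List.mem_cons] at hb
      rcases hb with rfl | hb
      · simp [hall a (by simp)]
      · exact ih (i + 1) (fun b hb => hall b (by simp [hb]))
          (by simp only [List.length_cons] at hle; push_cast at hle ⊢; omega) b hb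

theorem pvRange_step_cons {i n k : Int} (hk : 0 < k) (hin : i < n) :
    PySem.List.pyRange i n k = i :: PySem.List.pyRange (i + k) n k := by
  rw [PySem.List.pyRange_of_pos _ _ hk, PySem.List.pyRange_of_pos _ _ hk]
  rw [if_pos hin]
  have hcnt : (n - i + k - 1) / k = (n - (i + k) + k - 1) / k + 1 := by
    have h1 : n - i + k - 1 = (n - (i + k) + k - 1) + 1 * k := by ring
    rw [h1, Int.add_mul_ediv_right _ _ (by omega)]
  rw [hcnt]
  have hnn : 0 ≤ (n - (i + k) + k - 1) / k := by
    apply Int.ediv_nonneg _ (by omega)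
    omega
  have hc0 : (if i + k < n then ((n - (i + k) + k - 1) / k).toNat else 0)
      = ((n - (i + k) + k - 1) / k).toNat := by
    split
    · rfl
    · rw [Int.ediv_eq_zero_of_lt (by omega) (by omega)]
      rfl
  rw [hc0, Int.toNat_add hnn (by norm_num)]
  norm_num
  rw [List.range_succ_eq_map]
  simp only [List.map_cons, List.map_map, Nat.cast_zero, mul_zero, add_zero]
  congr 1
  apply List.map_congr_left
  intro t _
  simp only [Function.comp]
  push_cast
  ring

theorem pvRound_W (s : List Int) (q : Nat) :
    ∀ (bs : List (List Int)) (i : Int), (∀ b ∈ bs, b.length = q) →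
      pvW (pvDistr s i bs) = pvW bs +
        ((PySem.List.pyRange i (i + (bs.length : Int))).map
          (fun j => if j < (s.length : Int) then
              PySem.List.pyGetD s j 0 * ((q : Int) + 1) else 0)).sum := by
  intro bs
  induction bs with
  | nil => intro i _; simp [pvDistr, pvW]
  | cons b bs ih =>
      intro i hall
      have hcons : PySem.List.pyRange i (i + ((b :: bs).length : Int))
          = i :: PySem.List.pyRange (i + 1) (i + ((b :: bs).length : Int)) := by
        apply PySem.List.pyRange_one_cons
        simp only [List.length_cons]
        push_cast
        omega
      have hend : i + ((b :: bs).length : Int) = (i + 1) + (bs.length : Int) := by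
        simp only [List.length_cons]; push_cast; ring
      rw [hcons, List.map_cons, List.sum_cons]
      simp only [pvDistr, pvW, List.map_cons, List.sum_cons]
      have ihh := ih (i + 1) (fun b hb => hall b (by simp [hb]))
      simp only [pvW] at ihh
      rw [ihh, hend]
      by_cases hc : i < (s.length : Int)
      · rw [if_pos hc, if_pos hc, pvWrow_append, hall b (by simp)]
        ring
      · rw [if_neg hc, if_neg hc]
        ring

theorem pvTsum_split (s : List Int) (k i : Int) (q : Nat) (hk : 1 ≤ k)
    (hi : i = (q : Int) * k) (hin : i < (s.length : Int)) :
    pvTsum s k i =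
      ((PySem.List.pyRange i (i + k)).map
        (fun j => if j < (s.length : Int) then
            PySem.List.pyGetD s j 0 * ((q : Int) + 1) else 0)).sum + pvTsum s k (i + k) := by
  have hq0 : (0:Int) ≤ i := by
    rw [hi]; positivity
  have hfd : ∀ j, i ≤ j → j < i + k → PySem.Int.floordiv j k = (q : Int) := by
    intro j h1 h2
    rw [PySem.Int.floordiv_eq_iff_of_pos (by omega)]
    constructor
    · rw [← hi] at *; omega
    · have : ((q:Int) + 1) * k = i + k := by rw [hi]; ring
      omega
  by_cases hfull : i + k ≤ (s.length : Int)
  · rw [pvTsum, PySem.List.pyRange_one_append i (i + k) (s.length : Int) (by omega) hfull,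
        List.map_append, List.sum_append]
    congr 1
    congr 1
    apply List.map_congr_left
    intro j hj
    rw [PySem.List.mem_pyRange_one] at hj
    rw [if_pos (by omega), hfd j hj.1 hj.2]
  · rw [pvTsum, pvTsum, PySem.List.pyRange_one_eq_nil (by omega : (s.length:Int) ≤ i + k)]
    rw [PySem.List.pyRange_one_append i (s.length : Int) (i + k) (by omega) (by omega),
        List.map_append, List.sum_append]
    simp only [List.map_nil, List.sum_nil, add_zero]
    have hz : ((PySem.List.pyRange (s.length : Int) (i + k)).map
        (fun j => if j < (s.length : Int) then
            PySem.List.pyGetD s j 0 * ((q : Int) + 1) else 0)).sum = 0 := by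
      apply List.sum_eq_zero
      intro x hx
      rw [List.mem_map] at hx
      obtain ⟨j, hj, rfl⟩ := hx
      rw [PySem.List.mem_pyRange_one] at hj
      rw [if_neg (by omega)]
    rw [hz, add_zero]
    congr 1
    apply List.map_congr_left
    intro j hj
    rw [PySem.List.mem_pyRange_one] at hj
    rw [if_pos hj.2, hfd j hj.1 (by omega)]

theorem pvRange_step_nil {i n k : Int} (hk : 0 < k) (hin : n ≤ i) :
    PySem.List.pyRange i n k = [] := by
  rw [PySem.List.pyRange_of_pos _ _ hk]
  simp [if_neg (not_lt.mpr hin)]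

theorem pvOuter (s : List Int) (k : Int) (hk : 1 ≤ k) :
    ∀ (r : Nat) (q : Nat) (i : Int) (bs : List (List Int)),
      ((s.length : Int) - i).toNat ≤ r → i = (q : Int) * k →
      bs.length = k.toNat → (∀ b ∈ bs, b.length = q) →
      pvW ((PySem.List.pyRange i (s.length : Int) k).foldl (fun bs i =>
        (PySem.List.pyRange 0 k).foldl (fun bs j =>
          if i + j < (s.length : Int) then
            PySem.List.pySetD bs j (PySem.List.pyGetD bs j [] ++ [PySem.List.pyGetD s (i + j) 0])
          else bs) bs) bs)
      = pvW bs + pvTsum s k i := by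
  intro r
  induction r with
  | zero =>
      intro q i bs hr hi hlen hall
      have hni : (s.length : Int) ≤ i := by omega
      rw [pvRange_step_nil (by omega) hni]
      simp [pvTsum, PySem.List.pyRange_one_eq_nil hni]
  | succ r ih =>
      intro q i bs hr hi hlen hall
      by_cases hni : (s.length : Int) ≤ i
      · rw [pvRange_step_nil (by omega) hni]
        simp [pvTsum, PySem.List.pyRange_one_eq_nil hni]
      · push Not at hni
        rw [pvRange_step_cons (by omega) hni, List.foldl_cons]
        have hkb : k = (bs.length : Int) := by
          rw [hlen]; omega
        have hstep : (PySem.List.pyRange 0 k).foldl (fun bs j =>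
            if i + j < (s.length : Int) then
              PySem.List.pySetD bs j (PySem.List.pyGetD bs j [] ++ [PySem.List.pyGetD s (i + j) 0])
            else bs) bs = pvDistr s i bs := by
          rw [hkb, pvInner_fold s i bs bs.length le_rfl]
          simp
        rw [hstep]
        have hsplit := pvTsum_split s k i q hk hi hni
        by_cases hfull : i + k ≤ (s.length : Int)
        · rw [ih (q + 1) (i + k) (pvDistr s i bs) (by omega)
              (by push_cast; rw [hi]; ring)
              (by rw [pvDistr_length, hlen])
              (pvDistr_lengths s q bs i hall (by rw [← hkb]; omega))]
          rw [pvRound_W s q bs i hall, hsplit, ← hkb]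
          ring
        · push Not at hfull
          rw [pvRange_step_nil (by omega) (by omega : (s.length : Int) ≤ i + k)]
          simp only [List.foldl_nil]
          rw [pvRound_W s q bs i hall, hsplit, ← hkb]
          have hz : pvTsum s k (i + k) = 0 := by
            simp [pvTsum, PySem.List.pyRange_one_eq_nil (by omega : (s.length:Int) ≤ i + k)]
          rw [hz]
          ring

theorem pvPhase3 (bs : List (List Int)) (k : Int) (hbs : k = (bs.length : Int)) :
    (PySem.List.pyRange 0 k).foldl (fun r i =>
      (PySem.List.pyRange 0 ((PySem.List.pyGetD bs i []).length : Int)).foldl (fun r j =>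
        r + PySem.List.pyGetD (PySem.List.pyGetD bs i []) j 0 * (1 + j)) r) 0
    = pvW bs := by
  subst hbs
  rw [PySem.List.foldl_pyRange_zero_pyGetD' bs []
    (fun r b => (PySem.List.pyRange 0 ((b.length : Nat) : Int)).foldl (fun r j =>
        r + PySem.List.pyGetD b j 0 * (1 + j)) r) 0]
  have hf : (fun r b => (PySem.List.pyRange 0 ((b.length : Nat) : Int)).foldl (fun r j =>
        r + PySem.List.pyGetD b j 0 * (1 + j)) r) = fun (r : Int) (b : List Int) => r + pvWrow b := by
    funext r b
    rw [PySem.List.foldl_add (PySem.List.pyRange 0 ((b.length : Nat) : Int))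
        (fun j => PySem.List.pyGetD b j 0 * (1 + j)) r]
    congr 1
    rw [pvWrow, PySem.List.enumerate_eq_map_pyRange b 0, List.map_map]
    simp only [PySem.List.len_eq]
    exact congrArg List.sum (List.map_congr_left (fun j _ => by
      simp only [Function.comp]; ring))
  rw [hf, PySem.List.foldl_add bs pvWrow 0, pvW, zero_add]

theorem pvFoldl_length_inv {α β : Type} (f : List α → β → List α)
    (h : ∀ bs x, (f bs x).length = bs.length) :
    ∀ (l : List β) (bs : List α), (l.foldl f bs).length = bs.length := by
  intro l
  induction l with
  | nil => intro bs; rfl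
  | cons x l ih => intro bs; rw [List.foldl_cons, ih, h]

theorem pvMain_equiv (k : Int) (c : List Int) (hk : 1 ≤ k) :
    getMinimumCost k c = getMinimumCost_alt k c := by
  unfold getMinimumCost getMinimumCost_alt
  simp only []
  set s := PySem.List.sorted c id true with hs
  have hb0 : (PySem.List.pyRange 0 k).foldl (fun bs _ => bs ++ [([] : List Int)]) []
      = List.replicate k.toNat ([] : List Int) := by
    rw [PySem.List.foldl_append_singleton_eq_map (fun _ => ([] : List Int))]
    simp [List.map_const', PySem.List.length_pyRange_one]
  rw [hb0]
  set buyers := (PySem.List.pyRange 0 (s.length : Int) k).foldl (fun bs i =>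
      (PySem.List.pyRange 0 k).foldl (fun bs j =>
        if i + j < (s.length : Int) then
          PySem.List.pySetD bs j (PySem.List.pyGetD bs j [] ++ [PySem.List.pyGetD s (i + j) 0])
        else bs) bs) (List.replicate k.toNat ([] : List Int)) with hbuyers
  have hblen : buyers.length = k.toNat := by
    rw [hbuyers]
    rw [pvFoldl_length_inv _ (fun bs i => pvFoldl_length_inv _ (fun bs j => by
      split_ifs <;> simp) _ bs) _ _]
    simp
  rw [pvPhase3 buyers k (by rw [hblen]; omega)]
  have hW := pvOuter s k hk s.length 0 0 (List.replicate k.toNat ([] : List Int))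
    (by omega) (by ring) (by simp) (by intro b hb; rw [List.eq_of_mem_replicate hb]; rfl)
  rw [← hbuyers] at hW
  rw [hW]
  have hW0 : pvW (List.replicate k.toNat ([] : List Int)) = 0 := by
    simp [pvW, pvWrow, List.map_replicate, PySem.List.enumerate_nil]
  rw [hW0, zero_add]
  rw [PySem.List.enumerate_eq_map_pyRange s 0, List.map_map, pvTsum]
  simp only [PySem.List.len_eq]
  rfl

-- ===== VERDICT (by name: the statement is the Claim_ definition above) =====
theorem getMinimumCost_spec : Claim_equal_getMinimumCost := by
  intro k c _ hk
  unfold Pre_getMinimumCost at hk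
  unfold Spec_getMinimumCost
  exact pvMain_equiv k c hk
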